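-- pv_equiv track=rewrite | github.com/VanOFiuza/ProgMulti_Python | Exercicios12.py | temPrimoQ
-- ===== SOURCE A (Python) =====
-- def primo(n):
--     for i in range(2,n):
--         if n%i==0:
--             return False
--     else:
--         return True
--
-- def extraiLista(w):
--     if len(w)==0:
--         return None
--     else:
--         return w.pop()
--
-- def temPrimoQ(w):
--     v = extraiLista(w)
--     if v == None:
--         return False
--     else:
--         if len(v) > 0:
--             p = v.pop()
--             if primo(p):
--                 return True
--             else:
--                 w.append(v)
--                 return temPrimoQ(w)
--         else:
--             return temPrimoQ(w)
-- ===== SOURCE B (Python) =====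
-- def temPrimoQ(w):
--     return any(all(p % i != 0 for i in range(2, p))
--                for v in reversed(w)
--                for p in reversed(v))
-- ===== Notes on version B (the rewrite author's own statement) =====
-- stated objective: simpler
-- what changed: The destructive recursion that pops sublists and elements off w (mutating the argument) is replaced by a single non-mutating any/all comprehension over the reversed lists; equivalence is about the return value only (A consumes w, B leaves it intact).
import Mathlib
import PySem

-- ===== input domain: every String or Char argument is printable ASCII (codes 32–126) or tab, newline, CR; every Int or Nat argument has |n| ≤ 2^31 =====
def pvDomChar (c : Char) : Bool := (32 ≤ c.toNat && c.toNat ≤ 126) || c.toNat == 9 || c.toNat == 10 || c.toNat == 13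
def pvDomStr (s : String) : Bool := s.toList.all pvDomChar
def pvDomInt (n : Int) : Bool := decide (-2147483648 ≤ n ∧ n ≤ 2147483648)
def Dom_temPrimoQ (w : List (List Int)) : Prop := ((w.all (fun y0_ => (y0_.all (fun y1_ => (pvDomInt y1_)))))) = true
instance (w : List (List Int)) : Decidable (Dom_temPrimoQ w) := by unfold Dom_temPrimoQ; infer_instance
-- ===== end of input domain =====

-- B replaces A's destructive pop-based recursion with one non-mutating any/all comprehension
-- (simpler); A consumes its argument w in place, B does not — the claim is about the RETURN value only.

-- ===== PORT A =====
-- primo: for i in range(2,n): if n%i==0: return False; else: return True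
def primoGo (n : Int) : List Int → Bool
  | [] => true
  | i :: rest => if PySem.Int.mod n i == 0 then false else primoGo n rest

def primo (n : Int) : Bool := primoGo n (PySem.List.pyRange 2 n 1)

-- extraiLista (return None if w empty, else w.pop()) is inlined: the 'v == None' branch is the
-- 'w = []' case, and pop's mutation of w is carried as w.dropLast in the recursive calls;
-- v is w.getLast, p is v's last element.
def temPrimoQ (w : List (List Int)) : Bool :=
  if hw : w = [] then false                         -- extraiLista(w) == None
  else if hv : (w.getLast hw).length > 0 then       -- v = w.pop(); len(v) > 0
    if primo ((w.getLast hw).getLast (List.ne_nil_of_length_pos hv)) then true   -- p = v.pop()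
    else temPrimoQ (w.dropLast ++ [(w.getLast hw).dropLast])   -- w.append(v); recurse
  else temPrimoQ w.dropLast                         -- recurse on the shrunk w
termination_by (w.map List.length).sum + w.length
decreasing_by
  · have h : w.dropLast ++ [w.getLast hw] = w := List.dropLast_append_getLast hw
    have hs : ((w.dropLast.map List.length).sum + (w.getLast hw).length)
        = (w.map List.length).sum := by
      conv_rhs => rw [← h]
      simp
    have hvd : (w.getLast hw).dropLast.length = (w.getLast hw).length - 1 :=
      List.length_dropLast
    have hl : w.dropLast.length = w.length - 1 := List.length_dropLast
    have hw0 : 0 < w.length := List.length_pos_iff.mpr hw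
    simp only [List.map_append, List.sum_append, List.map_cons, List.map_nil, List.sum_cons,
      List.sum_nil, List.length_append, List.length_cons, List.length_nil]
    omega
  · have h : w.dropLast ++ [w.getLast hw] = w := List.dropLast_append_getLast hw
    have hs : ((w.dropLast.map List.length).sum + (w.getLast hw).length)
        = (w.map List.length).sum := by
      conv_rhs => rw [← h]
      simp
    have hw0 : 0 < w.length := List.length_pos_iff.mpr hw
    have hl : w.dropLast.length = w.length - 1 := List.length_dropLast
    omega

-- ===== PORT B =====
def temPrimoQ_alt (w : List (List Int)) : Bool :=
  w.reverse.any (fun v => v.reverse.any (fun p =>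
    (PySem.List.pyRange 2 p 1).all (fun i => PySem.Int.mod p i != 0)))

-- ===== PRECONDITION & SPEC =====
def Spec_temPrimoQ (w : List (List Int)) (out : Bool) : Prop := out = temPrimoQ_alt w
instance (w : List (List Int)) (out : Bool) : Decidable (Spec_temPrimoQ w out) := by unfold Spec_temPrimoQ; infer_instance

-- ===== CLAIM (what is proved, stated in full; the proofs are below) =====
def Claim_equal_temPrimoQ : Prop := ∀ (w : List (List Int)), Dom_temPrimoQ w → Spec_temPrimoQ w (temPrimoQ w)

-- ===== LEMMAS AND PROOFS =====
theorem primoGo_eq_all (n : Int) (l : List Int) :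
    primoGo n l = l.all (fun i => PySem.Int.mod n i != 0) := by
  induction l with
  | nil => rfl
  | cons i rest ih =>
    simp only [primoGo, List.all_cons, ← ih]
    by_cases h : PySem.Int.mod n i == 0 <;> simp_all [bne]

theorem temPrimoQ_eq_alt (w : List (List Int)) : temPrimoQ w = temPrimoQ_alt w := by
  induction w using temPrimoQ.induct with
  | case1 => simp [temPrimoQ, temPrimoQ_alt]
  | case2 w hw hv hp =>
    -- last sublist nonempty, its last element satisfies primo: both sides true
    have h : w.dropLast ++ [w.getLast hw] = w := List.dropLast_append_getLast hw
    have hvp : (w.getLast hw).dropLast ++ [(w.getLast hw).getLast (List.ne_nil_of_length_pos hv)]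
        = w.getLast hw := List.dropLast_append_getLast _
    rw [temPrimoQ, dif_neg hw, dif_pos hv, if_pos hp]
    unfold temPrimoQ_alt
    conv_rhs => rw [← h, ← hvp]
    rw [primo, primoGo_eq_all] at hp
    simp [hp]
  | case3 w hw hv hp ih =>
    -- last sublist nonempty, its last element fails primo: drop it and recurse
    have h : w.dropLast ++ [w.getLast hw] = w := List.dropLast_append_getLast hw
    have hvp : (w.getLast hw).dropLast ++ [(w.getLast hw).getLast (List.ne_nil_of_length_pos hv)]
        = w.getLast hw := List.dropLast_append_getLast _
    rw [temPrimoQ, dif_neg hw, dif_pos hv, if_neg hp, ih]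
    unfold temPrimoQ_alt
    conv_rhs => rw [← h, ← hvp]
    have hpf : primo ((w.getLast hw).getLast (List.ne_nil_of_length_pos hv)) = false := by
      simpa using hp
    rw [primo, primoGo_eq_all] at hpf
    simp [hpf]
  | case4 w hw hv ih =>
    -- last sublist empty: discard it and recurse
    have h : w.dropLast ++ [w.getLast hw] = w := List.dropLast_append_getLast hw
    have hve : w.getLast hw = [] := List.length_eq_zero_iff.mp (by omega)
    rw [temPrimoQ, dif_neg hw, dif_neg hv, ih]
    unfold temPrimoQ_alt
    conv_rhs => rw [← h]
    simp [hve]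

-- ===== VERDICT (by name: the statement is the Claim_ definition above) =====
theorem temPrimoQ_spec : Claim_equal_temPrimoQ := by
  intro w _
  exact temPrimoQ_eq_alt w
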